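-- pv_equiv track=rewrite | github.com/lasersonlab/epiphip | models/simple_model.py | count_attribute
-- ===== SOURCE A (Python) =====
-- def count_attribute(string, attribute):
-- 	charged = ['R', 'K', 'D', 'E']
-- 	polar = ['Q', 'N', 'H', 'S', 'T', 'Y', 'C', 'W']
-- 	nonpolar = ['A', 'I', 'L', 'M', 'F', 'V', 'P', 'G']
-- 	aa_list = None
--
-- 	if attribute == "charged":
-- 		aa_list = charged
-- 	elif attribute == "polar":
-- 		aa_list = polar
-- 	elif attribute == "nonpolar":
-- 		aa_list = nonpolar
-- 	else:
-- 		raise(ValueError())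
--
-- 	aa_sum = 0
-- 	for aa in aa_list:
-- 		aa_sum = aa_sum + string.lower().count(aa.lower())
-- 	return(aa_sum)
-- ===== SOURCE B (Python) =====
-- def count_attribute(string, attribute):
--     if attribute == "charged":
--         aa_set = set("rkde")
--     elif attribute == "polar":
--         aa_set = set("qnhstycw")
--     elif attribute == "nonpolar":
--         aa_set = set("ailmfvpg")
--     else:
--         raise(ValueError())
--     return sum(1 for c in string.lower() if c in aa_set)
-- ===== Notes on version B (the rewrite author's own statement) =====
-- stated objective: simpler
-- what changed: Instead of eight separate string.count scans (one per category letter), B selects the category as a set of lowercase letters and makes a single pass over the lowered string, counting characters that belong to the set.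
import Mathlib
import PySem

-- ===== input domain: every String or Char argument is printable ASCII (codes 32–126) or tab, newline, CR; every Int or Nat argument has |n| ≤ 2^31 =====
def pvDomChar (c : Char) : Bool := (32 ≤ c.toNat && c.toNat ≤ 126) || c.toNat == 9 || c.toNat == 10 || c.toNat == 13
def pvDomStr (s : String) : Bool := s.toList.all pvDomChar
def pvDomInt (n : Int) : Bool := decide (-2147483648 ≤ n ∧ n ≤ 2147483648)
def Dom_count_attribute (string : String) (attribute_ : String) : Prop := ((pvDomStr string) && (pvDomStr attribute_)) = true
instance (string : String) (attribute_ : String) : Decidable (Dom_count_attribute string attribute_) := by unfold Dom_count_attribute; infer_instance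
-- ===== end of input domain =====

-- B replaces A's per-letter repeated .count scans with one pass over the lowered string testing set membership (simpler, single traversal).


-- ===== PORT A =====
-- literal transliteration of A: pick the letter list, then sum string.lower().count(aa.lower()) over it
def count_attribute (string : String) (attribute_ : String) : Int :=
  let charged : List String := ["R", "K", "D", "E"]
  let polar : List String := ["Q", "N", "H", "S", "T", "Y", "C", "W"]
  let nonpolar : List String := ["A", "I", "L", "M", "F", "V", "P", "G"]
  let aa_list : List String :=
    if attribute_ = "charged" then charged
    else if attribute_ = "polar" then polar
    else nonpolar  -- the final 'else' raises ValueError in Python: excluded by Pre_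
  aa_list.foldl
    (fun aa_sum aa =>
      aa_sum + (PySem.Str.count (PySem.Str.lower string) (PySem.Str.lower aa) : Int))
    0

-- ===== PORT B =====
-- literal transliteration of B: pick the lowercase letter set, then sum(1 for c in string.lower() if c in aa_set)
def count_attribute_alt (string : String) (attribute_ : String) : Int :=
  let aa_set : List Char :=
    if attribute_ = "charged" then PySem.Set.ofList ['r', 'k', 'd', 'e']
    else if attribute_ = "polar" then PySem.Set.ofList ['q', 'n', 'h', 's', 't', 'y', 'c', 'w']
    else PySem.Set.ofList ['a', 'i', 'l', 'm', 'f', 'v', 'p', 'g']  -- final 'else' raises: excluded by Pre_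
  ((PySem.Str.lower string).toList.map
    (fun c => if c ∈ aa_set then (1 : Int) else 0)).sum

-- ===== PRECONDITION & SPEC =====
-- Pre_ excludes exactly the unknown attributes, on which A (and B) raise ValueError.
def Pre_count_attribute (string : String) (attribute_ : String) : Prop :=
  attribute_ = "charged" ∨ attribute_ = "polar" ∨ attribute_ = "nonpolar"
instance (string : String) (attribute_ : String) : Decidable (Pre_count_attribute string attribute_) := by unfold Pre_count_attribute; infer_instance
def pvWitness_count_attribute : String × String := ("RkDe wLq", "charged")

def Spec_count_attribute (string : String) (attribute_ : String) (out : Int) : Prop := out = count_attribute_alt string attribute_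
instance (string : String) (attribute_ : String) (out : Int) : Decidable (Spec_count_attribute string attribute_ out) := by unfold Spec_count_attribute; infer_instance

-- ===== CLAIM (what is proved, stated in full; the proofs are below) =====
def Claim_equal_count_attribute : Prop := ∀ (string : String) (attribute_ : String), Dom_count_attribute string attribute_ → Pre_count_attribute string attribute_ → Spec_count_attribute string attribute_ (count_attribute string attribute_)

-- ===== LEMMAS AND PROOFS =====

-- Python's count over a single-character pattern is List.count (by induction on the fueled helper of PySem.Chars.count).
theorem pv_count_go_single (c : Char) (l : List Char) (fuel acc : Nat) (h : l.length ≤ fuel) :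
    PySem.Chars.count.go [c] fuel l acc = acc + l.count c := by
  induction l generalizing fuel acc with
  | nil => cases fuel <;> simp [PySem.Chars.count.go]
  | cons x t ih =>
    cases fuel with
    | zero => simp at h
    | succ f =>
      simp only [List.length_cons] at h
      rw [PySem.Chars.count.go]
      by_cases hx : c = x
      · subst hx
        simp [ih f (acc + 1) (by omega)]
        omega
      · simp [hx, Ne.symm hx, ih f acc (by omega)]

theorem pv_count_single (s : List Char) (c : Char) :
    PySem.Chars.count s [c] = s.count c := by
  simp [PySem.Chars.count, pv_count_go_single c s s.length 0 le_rfl]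

-- the 0/1 membership sum over L equals the sum of the individual letter counts, per category
theorem pv_charged (L : List Char) :
    ((L.count 'r' : Int) + L.count 'k' + L.count 'd' + L.count 'e')
      = (L.map (fun c => if c = 'r' ∨ c = 'k' ∨ c = 'd' ∨ c = 'e' then (1 : Int) else 0)).sum := by
  induction L with
  | nil => simp
  | cons c L ih =>
    simp only [List.count_cons, List.map_cons, List.sum_cons]
    by_cases h : c = 'r' ∨ c = 'k' ∨ c = 'd' ∨ c = 'e'
    · rw [if_pos h]
      rcases h with rfl | rfl | rfl | rfl <;> simp <;> linarith [ih]
    · rw [if_neg h]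
      push Not at h
      obtain ⟨h1, h2, h3, h4⟩ := h
      simp only [beq_iff_eq, if_neg h1, if_neg h2, if_neg h3, if_neg h4]
      push_cast
      linarith [ih]

theorem pv_polar (L : List Char) :
    ((L.count 'q' : Int) + L.count 'n' + L.count 'h' + L.count 's' + L.count 't' + L.count 'y'
        + L.count 'c' + L.count 'w')
      = (L.map (fun c =>
          if c = 'q' ∨ c = 'n' ∨ c = 'h' ∨ c = 's' ∨ c = 't' ∨ c = 'y' ∨ c = 'c' ∨ c = 'w'
          then (1 : Int) else 0)).sum := by
  induction L with
  | nil => simp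
  | cons c L ih =>
    simp only [List.count_cons, List.map_cons, List.sum_cons]
    by_cases h : c = 'q' ∨ c = 'n' ∨ c = 'h' ∨ c = 's' ∨ c = 't' ∨ c = 'y' ∨ c = 'c' ∨ c = 'w'
    · rw [if_pos h]
      rcases h with rfl | rfl | rfl | rfl | rfl | rfl | rfl | rfl <;> simp <;> linarith [ih]
    · rw [if_neg h]
      push Not at h
      obtain ⟨h1, h2, h3, h4, h5, h6, h7, h8⟩ := h
      simp only [beq_iff_eq, if_neg h1, if_neg h2, if_neg h3, if_neg h4, if_neg h5, if_neg h6,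
        if_neg h7, if_neg h8]
      push_cast
      linarith [ih]

theorem pv_nonpolar (L : List Char) :
    ((L.count 'a' : Int) + L.count 'i' + L.count 'l' + L.count 'm' + L.count 'f' + L.count 'v'
        + L.count 'p' + L.count 'g')
      = (L.map (fun c =>
          if c = 'a' ∨ c = 'i' ∨ c = 'l' ∨ c = 'm' ∨ c = 'f' ∨ c = 'v' ∨ c = 'p' ∨ c = 'g'
          then (1 : Int) else 0)).sum := by
  induction L with
  | nil => simp
  | cons c L ih =>
    simp only [List.count_cons, List.map_cons, List.sum_cons]
    by_cases h : c = 'a' ∨ c = 'i' ∨ c = 'l' ∨ c = 'm' ∨ c = 'f' ∨ c = 'v' ∨ c = 'p' ∨ c = 'g'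
    · rw [if_pos h]
      rcases h with rfl | rfl | rfl | rfl | rfl | rfl | rfl | rfl <;> simp <;> linarith [ih]
    · rw [if_neg h]
      push Not at h
      obtain ⟨h1, h2, h3, h4, h5, h6, h7, h8⟩ := h
      simp only [beq_iff_eq, if_neg h1, if_neg h2, if_neg h3, if_neg h4, if_neg h5, if_neg h6,
        if_neg h7, if_neg h8]
      push_cast
      linarith [ih]

theorem pv_case_charged (string : String) :
    count_attribute string "charged" = count_attribute_alt string "charged" := by
  simp [count_attribute, count_attribute_alt, pv_count_single,
    show PySem.Chars.lower ['R'] = ['r'] from by decide,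
    show PySem.Chars.lower ['K'] = ['k'] from by decide,
    show PySem.Chars.lower ['D'] = ['d'] from by decide,
    show PySem.Chars.lower ['E'] = ['e'] from by decide,
    PySem.Set.mem_ofList]
  exact pv_charged _

theorem pv_case_polar (string : String) :
    count_attribute string "polar" = count_attribute_alt string "polar" := by
  simp [count_attribute, count_attribute_alt, pv_count_single,
    show PySem.Chars.lower ['Q'] = ['q'] from by decide,
    show PySem.Chars.lower ['N'] = ['n'] from by decide,
    show PySem.Chars.lower ['H'] = ['h'] from by decide,
    show PySem.Chars.lower ['S'] = ['s'] from by decide,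
    show PySem.Chars.lower ['T'] = ['t'] from by decide,
    show PySem.Chars.lower ['Y'] = ['y'] from by decide,
    show PySem.Chars.lower ['C'] = ['c'] from by decide,
    show PySem.Chars.lower ['W'] = ['w'] from by decide,
    PySem.Set.mem_ofList]
  exact pv_polar _

theorem pv_case_nonpolar (string : String) :
    count_attribute string "nonpolar" = count_attribute_alt string "nonpolar" := by
  simp [count_attribute, count_attribute_alt, pv_count_single,
    show PySem.Chars.lower ['A'] = ['a'] from by decide,
    show PySem.Chars.lower ['I'] = ['i'] from by decide,
    show PySem.Chars.lower ['L'] = ['l'] from by decide,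
    show PySem.Chars.lower ['M'] = ['m'] from by decide,
    show PySem.Chars.lower ['F'] = ['f'] from by decide,
    show PySem.Chars.lower ['V'] = ['v'] from by decide,
    show PySem.Chars.lower ['P'] = ['p'] from by decide,
    show PySem.Chars.lower ['G'] = ['g'] from by decide,
    PySem.Set.mem_ofList]
  exact pv_nonpolar _

-- ===== VERDICT (by name: the statement is the Claim_ definition above) =====
theorem count_attribute_spec : Claim_equal_count_attribute := by
  intro string attribute_ _ hpre
  unfold Spec_count_attribute
  rcases hpre with h | h | h <;> subst h
  · exact pv_case_charged string
  · exact pv_case_polar string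
  · exact pv_case_nonpolar string
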